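-- pv_equiv track=rewrite | github.com/Tinkerforge/esp32-firmware | software/src/modules/heating/tests/plan.py | _make_sawtooth
-- ===== SOURCE A (Python) =====
-- def _make_sawtooth(
--     count: int, period: int = 8, low: int = 1000, high: int = 9000
-- ) -> list:
--     prices = []
--     for i in range(count):
--         phase = i % period
--         price = low + (high - low) * phase // (period - 1) if period > 1 else low
--         prices.append(price)
--     return prices
-- ===== SOURCE B (Python) =====
-- def _make_sawtooth(
--     count: int, period: int = 8, low: int = 1000, high: int = 9000
-- ) -> list:
--     if period <= 1:
--         return [low] * count
--     base = [low + (high - low) * p // (period - 1) for p in range(min(period, count))]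
--     return (base * (count // period + 1))[:count]
-- ===== Notes on version B (the rewrite author's own statement) =====
-- stated objective: faster
-- what changed: Instead of recomputing phase and an integer division per index, B precomputes one cycle of period prices and tiles it, slicing to length count; the period<=1 case becomes a direct list replication.
import Mathlib
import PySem

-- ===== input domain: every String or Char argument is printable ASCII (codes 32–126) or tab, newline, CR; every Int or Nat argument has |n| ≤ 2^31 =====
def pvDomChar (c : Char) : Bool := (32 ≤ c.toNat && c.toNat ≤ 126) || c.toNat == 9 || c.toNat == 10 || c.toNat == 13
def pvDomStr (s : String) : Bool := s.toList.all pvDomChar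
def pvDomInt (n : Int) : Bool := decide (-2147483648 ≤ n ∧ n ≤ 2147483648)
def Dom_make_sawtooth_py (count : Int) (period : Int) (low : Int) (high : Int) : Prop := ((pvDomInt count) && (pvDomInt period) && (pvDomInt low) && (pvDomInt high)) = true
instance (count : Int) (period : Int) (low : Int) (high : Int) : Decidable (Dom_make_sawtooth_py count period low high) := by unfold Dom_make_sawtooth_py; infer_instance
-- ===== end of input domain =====

-- B precomputes one cycle of the sawtooth and tiles it instead of computing phase and a division per index.

-- ===== PORT A =====
def make_sawtooth_py (count : Int) (period : Int) (low : Int) (high : Int) : List Int :=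
  -- the Python 'prices.append(price)' loop, accumulated by cons and reversed at the end
  ((PySem.List.pyRange 0 count 1).foldl (fun prices i =>
    let phase := PySem.Int.mod i period
    let price := if period > 1 then low + PySem.Int.floordiv ((high - low) * phase) (period - 1) else low
    price :: prices) []).reverse

-- ===== PORT B =====
def make_sawtooth_py_alt (count : Int) (period : Int) (low : Int) (high : Int) : List Int :=
  if period ≤ 1 then List.replicate count.toNat low
  else
    let base := (PySem.List.pyRange 0 (min period count) 1).map
      (fun p => low + PySem.Int.floordiv ((high - low) * p) (period - 1))
    PySem.List.slice (List.flatten (List.replicate (PySem.Int.floordiv count period + 1).toNat base)) none (some count)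

-- ===== PRECONDITION & SPEC =====
-- Pre_ excludes exactly the inputs where A raises ZeroDivisionError: period == 0 with count > 0 (i % 0 in the loop).
def Pre_make_sawtooth_py (count : Int) (period : Int) (low : Int) (high : Int) : Prop :=
  period ≠ 0 ∨ count ≤ 0
instance (count : Int) (period : Int) (low : Int) (high : Int) : Decidable (Pre_make_sawtooth_py count period low high) := by unfold Pre_make_sawtooth_py; infer_instance
def pvWitness_make_sawtooth_py : Int × Int × Int × Int := (5, 3, 0, 6)

def Spec_make_sawtooth_py (count : Int) (period : Int) (low : Int) (high : Int) (out : List Int) : Prop := out = make_sawtooth_py_alt count period low high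
instance (count : Int) (period : Int) (low : Int) (high : Int) (out : List Int) : Decidable (Spec_make_sawtooth_py count period low high out) := by unfold Spec_make_sawtooth_py; infer_instance

-- ===== CLAIM (what is proved, stated in full; the proofs are below) =====
def Claim_equal_make_sawtooth_py : Prop := ∀ (count : Int) (period : Int) (low : Int) (high : Int), Dom_make_sawtooth_py count period low high → Pre_make_sawtooth_py count period low high → Spec_make_sawtooth_py count period low high (make_sawtooth_py count period low high)

-- ===== LEMMAS AND PROOFS =====

-- The cons-accumulator fold is a reversed map over the list.
theorem pv_foldl_cons_map {α β : Type} (g : α → β) (l : List α) (acc : List β) :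
    l.foldl (fun a i => g i :: a) acc = (l.map g).reverse ++ acc := by
  induction l generalizing acc with
  | nil => simp
  | cons x xs ih => simp [List.foldl, ih]

-- Indexing into a tiled list is indexing into the tile modulo its length.
theorem pv_flatten_replicate_getElem? {α : Type} (base : List α) (R j : Nat)
    (h : j < R * base.length) :
    (List.flatten (List.replicate R base))[j]? = base[j % base.length]? := by
  induction R generalizing j with
  | zero => simp at h
  | succ R ih =>
    have hmul : (R + 1) * base.length = R * base.length + base.length := by ring
    rw [List.replicate_succ, List.flatten_cons]
    by_cases hj : j < base.length
    · rw [List.getElem?_append_left hj, Nat.mod_eq_of_lt hj]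
    · have hge : base.length ≤ j := by omega
      rw [List.getElem?_append_right hge]
      rw [ih (j - base.length) (by omega)]
      congr 1
      have hm : j = base.length + (j - base.length) := by omega
      conv_rhs => rw [hm, Nat.add_mod_left]

theorem make_sawtooth_py_eq_map (count period low high : Int) :
    make_sawtooth_py count period low high =
      (List.range count.toNat).map (fun k : Nat =>
        if period > 1 then low + PySem.Int.floordiv ((high - low) * PySem.Int.mod ((k : Int)) period) (period - 1) else low) := by
  unfold make_sawtooth_py
  rw [pv_foldl_cons_map, PySem.List.pyRange_one]
  simp only [List.append_nil, List.reverse_reverse, List.map_map, Int.sub_zero]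
  refine List.map_congr_left ?_
  intro k _
  simp [Function.comp]

-- ===== VERDICT (by name: the statement is the Claim_ definition above) =====
theorem make_sawtooth_py_spec : Claim_equal_make_sawtooth_py := by
  unfold Claim_equal_make_sawtooth_py
  intro count period low high _ hpre
  unfold Spec_make_sawtooth_py
  rw [make_sawtooth_py_eq_map count period low high]
  unfold make_sawtooth_py_alt
  by_cases hple : period ≤ 1
  · -- all-low branch on both sides
    simp only [if_pos hple]
    have hlow : ∀ k ∈ List.range count.toNat,
        (if period > 1 then low + PySem.Int.floordiv ((high - low) * PySem.Int.mod ((k : Int)) period) (period - 1) else low) = low := by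
      intro k _; rw [if_neg (by omega)]
    rw [List.map_congr_left hlow]
    simp
  · simp only [if_neg hple]
    have hp1 : 1 < period := by omega
    have hp0 : 0 < period := by omega
    have hbase : (PySem.List.pyRange 0 (min period count) 1).map
        (fun p => low + PySem.Int.floordiv ((high - low) * p) (period - 1)) =
        (List.range (min period count).toNat).map (fun k : Nat => low + PySem.Int.floordiv ((high - low) * (k : Int)) (period - 1)) := by
      rw [PySem.List.pyRange_one]
      simp only [List.map_map, Int.sub_zero]
      refine List.map_congr_left ?_
      intro k _
      simp [Function.comp]
    rw [hbase]
    set Pm := (min period count).toNat with hPm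
    set base := (List.range Pm).map (fun k : Nat => low + PySem.Int.floordiv ((high - low) * (k : Int)) (period - 1)) with hbdef
    have hblen : base.length = Pm := by simp [hbdef]
    set R := (PySem.Int.floordiv count period + 1).toNat with hR
    have hfd : PySem.Int.floordiv count period = count / period :=
      PySem.Int.floordiv_eq_ediv_of_pos hp0
    by_cases hc : 0 ≤ count
    · -- count ≥ 0: tile the cycle and take the first count prices
      rw [PySem.List.slice_to _ hc]
      by_cases hcp : count < period
      · -- fewer prices than one full period: the cycle itself is the answer
        have hq0 : count / period = 0 := Int.ediv_eq_zero_of_lt hc hcp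
        have hR1 : R = 1 := by rw [hR, hfd, hq0]; rfl
        have hPmc : Pm = count.toNat := by rw [hPm]; omega
        rw [hR1]
        simp only [List.replicate_one, List.flatten_cons, List.flatten_nil, List.append_nil]
        rw [List.take_of_length_le (by rw [hblen, hPmc])]
        rw [hbdef, hPmc]
        refine List.map_congr_left ?_
        intro k hk
        rw [List.mem_range] at hk
        rw [if_pos hp1]
        congr 2
        have hkc : (k : Int) < period := by omega
        rw [PySem.Int.mod_eq_emod_of_pos hp0, Int.emod_eq_of_lt (by omega) hkc]
      · -- at least one full period: the cycle has exactly period entries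
        have hPmP : Pm = period.toNat := by rw [hPm]; omega
        have hPcast : (Pm : Int) = period := by rw [hPmP]; exact Int.toNat_of_nonneg (by omega)
        have hq0 : 0 ≤ count / period := Int.ediv_nonneg hc (by omega)
        have hdiv : period * (count / period) + count % period = count := Int.ediv_add_emod count period
        have hmodlt : count % period < period := Int.emod_lt_of_pos count hp0
        have hmodge : 0 ≤ count % period := Int.emod_nonneg count (by omega)
        have hRint : (R : Int) = count / period + 1 := by
          rw [hR, hfd]; exact Int.toNat_of_nonneg (by omega)
        have hnRP : count.toNat ≤ R * Pm := by
          have h1 : (count.toNat : Int) ≤ (R : Int) * (Pm : Int) := by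
            rw [hRint, hPcast, Int.toNat_of_nonneg hc]; nlinarith
          exact_mod_cast h1
        apply List.ext_getElem?
        intro j
        rw [List.getElem?_take, List.getElem?_map]
        by_cases hj : j < count.toNat
        · rw [if_pos hj, List.getElem?_range hj]
          rw [pv_flatten_replicate_getElem? base R j (by rw [hblen]; omega), hblen]
          have hjP : j % Pm < Pm := Nat.mod_lt j (by omega)
          rw [hbdef, List.getElem?_map, List.getElem?_range hjP]
          simp only [Option.map_some]
          congr 1
          rw [if_pos hp1]
          congr 2
          rw [← hPcast, PySem.Int.mod_natCast]
        · rw [if_neg hj]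
          rw [List.getElem?_eq_none (by simpa using hj)]
          simp
    · -- count < 0: both sides are empty
      have hcn : count.toNat = 0 := by omega
      have hqneg : count / period < 0 := by
        by_contra hq
        push_neg at hq
        have h1 := Int.ediv_add_emod count period
        have h2 := Int.emod_nonneg count (show period ≠ 0 by omega)
        nlinarith
      have hR0 : R = 0 := by rw [hR, hfd]; omega
      rw [hcn, hR0]
      simp [PySem.List.slice]
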